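-- pv_equiv track=rewrite | github.com/Kabir0067/Python-Beginer | Exam4/task5.py | determines
-- ===== SOURCE A (Python) =====
-- def  determines (num1):
--     s=7+5+1
--     c=0
--     while num1>0:
--         i=num1%10
--         c+=i
--         num1=num1//10
--     if c==s:
--         return True
--     else:
--         return False
-- ===== SOURCE B (Python) =====
-- def determines(num1):
--     if num1 <= 0:
--         return False
--     return sum(ord(d) - ord('0') for d in str(num1)) == 13
-- ===== Notes on version B (the rewrite author's own statement) =====
-- stated objective: idiomatic
-- what changed: B sums the digits by iterating over the decimal string representation (ord arithmetic per character) instead of peeling digits with an arithmetic modulo/floor-division while-loop, with an early False for non-positive input.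
import Mathlib
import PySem

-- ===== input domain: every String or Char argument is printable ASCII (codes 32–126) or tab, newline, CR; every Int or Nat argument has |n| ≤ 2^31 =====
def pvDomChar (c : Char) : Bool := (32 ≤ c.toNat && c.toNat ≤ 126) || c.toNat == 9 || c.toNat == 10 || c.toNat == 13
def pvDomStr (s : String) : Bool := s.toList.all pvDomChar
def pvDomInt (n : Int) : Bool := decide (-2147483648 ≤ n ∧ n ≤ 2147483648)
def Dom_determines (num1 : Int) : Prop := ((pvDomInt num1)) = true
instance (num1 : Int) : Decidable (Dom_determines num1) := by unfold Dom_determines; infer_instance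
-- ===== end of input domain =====

-- B sums the digits of the decimal string representation instead of peeling digits arithmetically; same O(log n) cost, more idiomatic.


-- ===== PORT A =====
-- the while-loop of A: state (num1, c)
def determinesGo (num1 c : Int) : Int :=
  if 0 < num1 then
    determinesGo (PySem.Int.floordiv num1 10) (c + PySem.Int.mod num1 10)
  else c
termination_by num1.toNat
decreasing_by
  have h : Int.fdiv num1 10 = num1 / 10 := by simp [Int.fdiv_eq_ediv]
  simp only [PySem.Int.floordiv, h]
  omega

def determines (num1 : Int) : Bool :=
  let s : Int := 7 + 5 + 1
  let c : Int := determinesGo num1 0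
  if c == s then true else false

-- ===== PORT B =====
def determines_alt (num1 : Int) : Bool :=
  if num1 ≤ 0 then false
  else ((PySem.Int.toStr num1).toList.foldl (fun a d => a + ((d.toNat : Int) - 48)) 0) == 13

-- ===== PRECONDITION & SPEC =====
def Spec_determines (num1 : Int) (out : Bool) : Prop := out = determines_alt num1
instance (num1 : Int) (out : Bool) : Decidable (Spec_determines num1 out) := by unfold Spec_determines; infer_instance

-- ===== CLAIM (what is proved, stated in full; the proofs are below) =====
def Claim_equal_determines : Prop := ∀ (num1 : Int), Dom_determines num1 → Spec_determines num1 (determines num1)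

-- ===== LEMMAS AND PROOFS =====

-- digit value of the chars produced by Nat.digitChar below 10
theorem digitChar_val (d : Nat) (h : d < 10) : ((Nat.digitChar d).toNat : Int) - 48 = (d : Int) := by
  interval_cases d <;> decide

-- char-sum of toDigitsCore equals digit sum plus char-sum of the accumulator
theorem toDigitsCore_sum (fuel : Nat) : ∀ (n : Nat) (acc : List Char), n < fuel →
    ((Nat.toDigitsCore 10 fuel n acc).map (fun c => ((c.toNat : Int) - 48))).sum
      = ((Nat.digits 10 n).sum : Int) + ((acc.map (fun c => ((c.toNat : Int) - 48))).sum) := by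
  induction fuel with
  | zero => intro n acc h; omega
  | succ fuel ih =>
    intro n acc h
    rw [Nat.toDigitsCore]
    by_cases h0 : n / 10 = 0
    · simp only [h0, if_pos]
      by_cases hn : n = 0
      · subst hn; simp [Nat.digitChar]
      · rw [Nat.digits_def' (by norm_num) (Nat.pos_of_ne_zero hn)]
        have hlt : n % 10 < 10 := Nat.mod_lt _ (by norm_num)
        have hd := digitChar_val (n % 10) hlt
        simp only [h0, Nat.digits_zero, List.map_cons, List.sum_cons, List.sum_nil]
        push_cast at hd ⊢
        omega
    · simp only [h0, ite_false]
      have hnpos : 0 < n := by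
        rcases Nat.eq_zero_or_pos n with h' | h'
        · exfalso; apply h0; simp [h']
        · exact h'
      have hlt' : n / 10 < fuel := by
        have : n / 10 < n := Nat.div_lt_self hnpos (by norm_num)
        omega
      rw [ih (n / 10) _ hlt']
      rw [Nat.digits_def' (by norm_num) hnpos]
      have hlt : n % 10 < 10 := Nat.mod_lt _ (by norm_num)
      have hd := digitChar_val (n % 10) hlt
      simp only [List.map_cons, List.sum_cons]
      push_cast at hd ⊢
      omega

-- A's loop computes c plus the digit sum of num1.toNat (for any start c)
theorem determinesGo_eq (n : Nat) : ∀ (num1 c : Int), num1.toNat = n →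
    determinesGo num1 c = c + ((Nat.digits 10 num1.toNat).sum : Int) := by
  induction n using Nat.strong_induction_on with
  | _ n ih =>
    intro num1 c hn
    rw [determinesGo]
    by_cases hpos : 0 < num1
    · have h10 : (0:Int) < 10 := by norm_num
      have hfd : PySem.Int.floordiv num1 10 = num1 / 10 := by
        simp [PySem.Int.floordiv, Int.fdiv_eq_ediv]
      have hmd : PySem.Int.mod num1 10 = num1 % 10 := by
        simp [PySem.Int.mod, Int.fmod_eq_emod]

      have hdivlt : (num1 / 10).toNat < n := by omega
      rw [if_pos hpos, hfd, hmd,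
        ih (num1 / 10).toNat hdivlt (num1 / 10) _ rfl]
      have hdig : Nat.digits 10 num1.toNat
          = num1.toNat % 10 :: Nat.digits 10 (num1.toNat / 10) := by
        exact Nat.digits_def' (by norm_num) (by omega)
      have htdiv : (num1 / 10).toNat = num1.toNat / 10 := by omega
      have htmod : (num1 % 10).toNat = num1.toNat % 10 := by omega
      rw [htdiv, hdig]
      simp only [List.sum_cons]
      push_cast
      omega
    · rw [if_neg hpos]
      have : num1.toNat = 0 := by omega
      rw [this]
      simp

theorem toChars_pos (n : Int) (h : 0 < n) :
    PySem.Int.toChars n = Nat.toDigits 10 n.toNat := by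
  simp [PySem.Int.toChars, not_lt.mpr (le_of_lt h)]

-- ===== VERDICT (by name: the statement is the Claim_ definition above) =====
theorem determines_spec : Claim_equal_determines := by
  intro num1 _
  unfold Spec_determines determines determines_alt
  by_cases hpos : 0 < num1
  · rw [if_neg (by omega : ¬ num1 ≤ 0)]
    rw [determinesGo_eq num1.toNat num1 0 rfl]
    have hfold : ∀ (l : List Char) (init : Int),
        l.foldl (fun a d => a + ((d.toNat : Int) - 48)) init
          = init + (l.map (fun c => ((c.toNat : Int) - 48))).sum := by
      intro l
      induction l with
      | nil => intro init; simp
      | cons x xs ih => intro init; simp [List.foldl_cons, ih]; ring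
    rw [PySem.Int.toList_toStr, toChars_pos num1 hpos, hfold,
      Nat.toDigits, toDigitsCore_sum (n := num1.toNat) (acc := []) _ (Nat.lt_succ_self _)]
    simp only [List.map_nil, List.sum_nil, add_zero, zero_add]
    cases h : (((Nat.digits 10 num1.toNat).sum : Int) == 13) <;> simp_all
  · rw [if_pos (by omega : num1 ≤ 0)]
    rw [determinesGo]
    rw [if_neg hpos]
    decide
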